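-- pv_equiv track=rewrite | github.com/LIKELION-INHA-9-ALGORITHM-STUDY/likelion-inha-9-algorithm-study | week-11/손민혁/02/solution.py | solution
-- ===== SOURCE A (Python) =====
-- def solution(n):
--
--     """
--     3진법 방식을 조금 변형시켜 풀었습니다.
--     나머지가 0,1,2 일 때, 각각 4,1,2를 answer에 추가
--     단, 나머지가 0일 때, carry를 발생시켜서 다음 연산에 영향(다음 나머지 -= 1)
--     """
--
--     answer = ""
--
--     carry = 0
--     while n >= 3:
--         n, r = n // 3, n % 3 + carry  # 몫, 나머지 + carry
--
--         if r <= 0: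
--             carry = -1  # carry 발생
--             if r == -1:
--                 answer = "2" + answer
--             elif r == 0:
--                 answer = "4" + answer
--         else:
--             carry = 0
--             if r == 1:
--                 answer = "1" + answer
--             elif r == 2:
--                 answer = "2" + answer
--
--     if n + carry == 1:
--         answer = "1" + answer
--     if n + carry == 2:
--         answer = "2" + answer
--
--     return answer
-- ===== SOURCE B (Python) =====
-- def solution(n):
--     if n <= 0:
--         return ""
--     return solution((n - 1) // 3) + "124"[(n - 1) % 3]
-- ===== Notes on version B (the rewrite author's own statement) =====
-- stated objective: simpler
-- what changed: Replaces A's iterative loop with a carry variable, four-way remainder branching and post-loop tail ifs by the standard bijective base-3 formulation: a three-line recursion on (n-1)//3 with the digit read from the table "124" at index (n-1)%3, no carry state and no tail handling.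
import Mathlib
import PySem

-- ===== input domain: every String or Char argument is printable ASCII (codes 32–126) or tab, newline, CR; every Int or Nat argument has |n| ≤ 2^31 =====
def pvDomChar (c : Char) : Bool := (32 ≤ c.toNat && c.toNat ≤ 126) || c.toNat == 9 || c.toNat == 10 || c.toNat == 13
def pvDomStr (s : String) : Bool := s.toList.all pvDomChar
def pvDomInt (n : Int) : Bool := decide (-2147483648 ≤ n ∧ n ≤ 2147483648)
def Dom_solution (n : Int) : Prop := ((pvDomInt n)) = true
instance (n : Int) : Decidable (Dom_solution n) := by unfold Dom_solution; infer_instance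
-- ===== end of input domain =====

-- B replaces A's iterative carry-propagating loop (four-way remainder branching plus
-- post-loop tail handling) by the standard bijective base-3 recursion on n-1: a
-- three-line recursive function with a digit-table lookup and no carry state (objective: simpler).

-- termination measure fact for A's loop, cited by decreasing_by
theorem pv_floordiv3_lt (n : Int) (h : 0 < n) :
    (PySem.Int.floordiv n 3).toNat < n.toNat := by
  have h1 : PySem.Int.floordiv n 3 < n :=
    (PySem.Int.floordiv_lt_iff_lt_mul (by norm_num)).mpr (by omega)
  have h2 : (0 : Int) ≤ PySem.Int.floordiv n 3 :=
    (PySem.Int.le_floordiv_iff_mul_le (by norm_num)).mpr (by omega)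
  omega

-- termination measure fact for B's recursion, cited by decreasing_by
theorem pv_floordiv3_pred_lt (n : Int) (h : ¬ n ≤ 0) :
    (PySem.Int.floordiv (n - 1) 3).toNat < n.toNat := by
  have h1 : PySem.Int.floordiv (n - 1) 3 < n :=
    (PySem.Int.floordiv_lt_iff_lt_mul (by norm_num)).mpr (by omega)
  have h2 : (0 : Int) ≤ PySem.Int.floordiv (n - 1) 3 :=
    (PySem.Int.le_floordiv_iff_mul_le (by norm_num)).mpr (by omega)
  omega

-- ===== PORT A =====
-- the while loop of A, state (n, carry, answer); the post-loop ifs are the else branch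
def solutionLoop (n carry : Int) (answer : String) : String :=
  if _h : 3 ≤ n then
    let n' := PySem.Int.floordiv n 3
    let r := PySem.Int.mod n 3 + carry
    if r ≤ 0 then
      if r = -1 then solutionLoop n' (-1) ("2" ++ answer)
      else if r = 0 then solutionLoop n' (-1) ("4" ++ answer)
      else solutionLoop n' (-1) answer
    else
      if r = 1 then solutionLoop n' 0 ("1" ++ answer)
      else if r = 2 then solutionLoop n' 0 ("2" ++ answer)
      else solutionLoop n' 0 answer
  else
    let a1 := if n + carry = 1 then "1" ++ answer else answer
    let a2 := if n + carry = 2 then "2" ++ a1 else a1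
    a2
termination_by n.toNat
decreasing_by all_goals exact pv_floordiv3_lt n (by omega)

def solution (n : Int) : String := solutionLoop n 0 ""

-- ===== PORT B =====
-- literal port of Source B: bijective base-3 recursion; "124"[(n-1)%3] is the string
-- index (the none branch of pyGet? is unreachable since 0 ≤ (n-1)%3 < 3)
def solution_alt (n : Int) : String :=
  if _h : n ≤ 0 then ""
  else
    solution_alt (PySem.Int.floordiv (n - 1) 3) ++
      (match PySem.Str.pyGet? "124" (PySem.Int.mod (n - 1) 3) with
       | some c => String.ofList [c]
       | none => "")
termination_by n.toNat
decreasing_by exact pv_floordiv3_pred_lt n _h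

-- ===== PRECONDITION & SPEC =====
def Spec_solution (n : Int) (out : String) : Prop := out = solution_alt n
instance (n : Int) (out : String) : Decidable (Spec_solution n out) := by unfold Spec_solution; infer_instance

-- ===== CLAIM (what is proved, stated in full; the proofs are below) =====
def Claim_equal_solution : Prop := ∀ (n : Int), Dom_solution n → Spec_solution n (solution n)

-- ===== LEMMAS AND PROOFS =====

-- floordiv/mod of a value written as q*3 + s with 0 ≤ s < 3
theorem pv_fdmod (q s : Int) (h0 : 0 ≤ s) (h2 : s < 3) :
    PySem.Int.floordiv (q * 3 + s) 3 = q ∧ PySem.Int.mod (q * 3 + s) 3 = s := by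
  have hf : PySem.Int.floordiv (q * 3 + s) 3 = q :=
    (PySem.Int.floordiv_eq_iff_of_pos (by norm_num)).mpr (by constructor <;> nlinarith)
  refine ⟨hf, ?_⟩
  have := PySem.Int.floordiv_mul_add_mod (q * 3 + s) 3
  rw [hf] at this; omega

-- one unfolding of B's recursion at m = 3*q' + s + 1 (so (m-1) = q'*3 + s), digit d
theorem pv_alt_step (q' s : Int) (hq : 0 ≤ q') (hs0 : 0 ≤ s) (hs2 : s < 3) (d : String)
    (hd : (match PySem.Str.pyGet? "124" s with
           | some c => String.ofList [c]
           | none => "") = d) :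
    solution_alt (q' * 3 + s + 1) = solution_alt q' ++ d := by
  rw [solution_alt]
  have hm := pv_fdmod q' s hs0 hs2
  rw [dif_neg (by omega : ¬ (q' * 3 + s + 1 ≤ 0)),
    show q' * 3 + s + 1 - 1 = q' * 3 + s by ring, hm.1, hm.2, hd]

-- loop invariant: A's loop with carry ∈ {0,-1} and accumulator `answer` computes
-- B's recursive value at n + carry, prepended to `answer`
theorem pv_loop_eq (k : Nat) : ∀ (n carry : Int) (answer : String),
    n.toNat ≤ k → (carry = 0 ∨ carry = -1) →
    solutionLoop n carry answer = solution_alt (n + carry) ++ answer := by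
  induction k with
  | zero =>
    intro n carry answer hk hc
    rw [solutionLoop, solution_alt]
    simp only [dif_neg (by omega : ¬ (3:Int) ≤ n), dif_pos (by omega : n + carry ≤ 0),
      if_neg (by omega : ¬ (n + carry = 1)), if_neg (by omega : ¬ (n + carry = 2))]
    simp
  | succ k ih =>
    intro n carry answer hk hc
    by_cases h3 : 3 ≤ n
    · rw [solutionLoop]
      simp only [dif_pos h3]
      have hq := PySem.Int.floordiv_mul_add_mod n 3
      have hqlt := pv_floordiv3_lt n (by omega)
      have hm0 := PySem.Int.mod_nonneg n (by norm_num : (0:Int) < 3)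
      have hm3 := PySem.Int.mod_lt n (by norm_num : (0:Int) < 3)
      set q := PySem.Int.floordiv n 3 with hqdef
      set r0 := PySem.Int.mod n 3 with hr0def
      have hkq : q.toNat ≤ k := by omega
      rcases hc with hc | hc <;> subst hc <;>
        rcases (by omega : r0 = 0 ∨ r0 = 1 ∨ r0 = 2) with hr | hr | hr <;> rw [hr]
      · -- carry 0, r0 = 0 : A emits '4'; n + 0 = (q-1)*3 + 2 + 1
        simp only [if_neg (by norm_num : ¬ ((0:Int)+0 = -1)), if_pos (by norm_num : (0:Int)+0 ≤ 0),
          if_pos (by norm_num : (0:Int)+0 = 0)]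
        rw [ih q (-1) _ hkq (Or.inr rfl),
          show n + 0 = (q - 1) * 3 + 2 + 1 by omega,
          pv_alt_step (q - 1) 2 (by omega) (by norm_num) (by norm_num) "4" (by decide),
          show q + -1 = q - 1 by ring, String.append_assoc]
      · -- carry 0, r0 = 1 : A emits '1'; n = q*3 + 0 + 1
        simp only [if_neg (by norm_num : ¬ ((1:Int)+0 ≤ 0)), if_pos (by norm_num : (1:Int)+0 = 1)]
        rw [ih q 0 _ hkq (Or.inl rfl),
          show n + 0 = q * 3 + 0 + 1 by omega,
          pv_alt_step q 0 (by omega) (by norm_num) (by norm_num) "1" (by decide),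
          add_zero, String.append_assoc]
      · -- carry 0, r0 = 2 : A emits '2'; n = q*3 + 1 + 1
        simp only [if_neg (by norm_num : ¬ ((2:Int)+0 ≤ 0)), if_neg (by norm_num : ¬ ((2:Int)+0 = 1)),
          if_pos (by norm_num : (2:Int)+0 = 2)]
        rw [ih q 0 _ hkq (Or.inl rfl),
          show n + 0 = q * 3 + 1 + 1 by omega,
          pv_alt_step q 1 (by omega) (by norm_num) (by norm_num) "2" (by decide),
          add_zero, String.append_assoc]
      · -- carry -1, r0 = 0 : r = -1, A emits '2'; n - 1 = (q-1)*3 + 1 + 1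
        simp only [if_pos (by norm_num : (0:Int)+(-1) ≤ 0), if_pos (by norm_num : (0:Int)+(-1) = -1)]
        rw [ih q (-1) _ hkq (Or.inr rfl),
          show n + -1 = (q - 1) * 3 + 1 + 1 by omega,
          pv_alt_step (q - 1) 1 (by omega) (by norm_num) (by norm_num) "2" (by decide),
          show q + -1 = q - 1 by ring, String.append_assoc]
      · -- carry -1, r0 = 1 : r = 0, A emits '4'; n - 1 = (q-1)*3 + 2 + 1
        simp only [if_pos (by norm_num : (1:Int)+(-1) ≤ 0),
          if_neg (by norm_num : ¬ ((1:Int)+(-1) = -1)), if_pos (by norm_num : (1:Int)+(-1) = 0)]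
        rw [ih q (-1) _ hkq (Or.inr rfl),
          show n + -1 = (q - 1) * 3 + 2 + 1 by omega,
          pv_alt_step (q - 1) 2 (by omega) (by norm_num) (by norm_num) "4" (by decide),
          show q + -1 = q - 1 by ring, String.append_assoc]
      · -- carry -1, r0 = 2 : r = 1, A emits '1'; n - 1 = q*3 + 0 + 1
        simp only [if_neg (by norm_num : ¬ ((2:Int)+(-1) ≤ 0)), if_pos (by norm_num : (2:Int)+(-1) = 1)]
        rw [ih q 0 _ hkq (Or.inl rfl),
          show n + -1 = q * 3 + 0 + 1 by omega,
          pv_alt_step q 0 (by omega) (by norm_num) (by norm_num) "1" (by decide),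
          add_zero, String.append_assoc]
    · -- post-loop tail: n < 3, so m = n + carry ≤ 2
      rw [solutionLoop]
      simp only [dif_neg h3]
      by_cases h1 : n + carry = 1
      · rw [if_pos h1, if_neg (by omega : ¬ (n + carry = 2)), h1,
          show (1:Int) = 0 * 3 + 0 + 1 by ring,
          pv_alt_step 0 0 (by omega) (by norm_num) (by norm_num) "1" (by decide)]
        rw [solution_alt]
        simp
      · by_cases h2 : n + carry = 2
        · rw [if_neg h1, if_pos h2, h2,
            show (2:Int) = 0 * 3 + 1 + 1 by ring,
            pv_alt_step 0 1 (by omega) (by norm_num) (by norm_num) "2" (by decide)]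
          rw [solution_alt]
          simp
        · rw [if_neg h1, if_neg h2, solution_alt]
          simp only [dif_pos (by omega : n + carry ≤ 0)]
          simp

-- ===== VERDICT (by name: the statement is the Claim_ definition above) =====
theorem solution_spec : Claim_equal_solution := by
  intro n _
  unfold Spec_solution solution
  rw [pv_loop_eq n.toNat n 0 "" le_rfl (Or.inl rfl), add_zero]
  simp
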